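-- pv_equiv track=rewrite | github.com/DGSW-CodeGraph/dongchan | programmers/131127_할인행사.py | solution
-- ===== SOURCE A (Python) =====
-- from collections import Counter
--
-- def solution(want, number, discount):
--     answer = 0
--     want_dict = {want[i]: number[i] for i in range(len(want))}
--
--     for i in range(len(discount) - 9):
--         window = discount[i:i+10]
--         window_count = Counter(window)
--
--         if all(window_count[item] >= want_dict[item] for item in want_dict):
--             answer += 1
--
--     return answer
-- ===== SOURCE B (Python) =====
-- def solution(want, number, discount):
--     demands = {}
--     for w, req in zip(want, number):
--         demands[w] = req
--     n = len(discount)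
--     prefs = {}
--     for item in demands:
--         p = [0]
--         c = 0
--         for d in discount:
--             if d == item:
--                 c += 1
--             p.append(c)
--         prefs[item] = p
--     answer = 0
--     for i in range(n - 9):
--         if all(prefs[item][i + 10] - prefs[item][i] >= req
--                for item, req in demands.items()):
--             answer += 1
--     return answer
-- ===== Notes on version B (the rewrite author's own statement) =====
-- stated objective: alternative
-- what changed: Instead of building a fresh Counter of every length-10 window, B precomputes one prefix-count array per wanted item once and checks each window with O(1) subtractions per item.
import Mathlib
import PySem

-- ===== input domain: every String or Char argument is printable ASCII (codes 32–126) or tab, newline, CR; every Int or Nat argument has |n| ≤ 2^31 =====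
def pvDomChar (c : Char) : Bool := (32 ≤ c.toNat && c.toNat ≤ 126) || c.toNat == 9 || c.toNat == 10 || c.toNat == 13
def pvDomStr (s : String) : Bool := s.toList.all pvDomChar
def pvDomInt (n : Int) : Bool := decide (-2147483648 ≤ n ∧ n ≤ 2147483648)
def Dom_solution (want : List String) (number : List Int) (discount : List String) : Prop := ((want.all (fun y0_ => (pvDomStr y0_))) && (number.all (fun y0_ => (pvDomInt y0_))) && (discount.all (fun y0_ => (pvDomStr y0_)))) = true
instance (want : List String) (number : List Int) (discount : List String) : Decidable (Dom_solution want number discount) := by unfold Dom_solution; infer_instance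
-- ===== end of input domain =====

-- B replaces A's per-window Counter with per-item prefix-count arrays built once (alternative decomposition, same asymptotics).


-- ===== PORT A =====
def solution (want : List String) (number : List Int) (discount : List String) : Int :=
  let want_dict : PySem.Dict String Int :=
    (PySem.List.pyRange 0 (want.length : Int) 1).foldl
      (fun d i => d.insert (PySem.List.pyGetD want i "") (PySem.List.pyGetD number i 0))
      PySem.Dict.empty
  (PySem.List.pyRange 0 ((discount.length : Int) - 9) 1).foldl
    (fun answer i =>
      let window := PySem.List.slice discount (some i) (some (i + 10))
      let window_count := PySem.Dict.counter window
      -- 'for item in want_dict' with the lookups want_dict[item] (always present) and Counter's default-0 get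
      if want_dict.items.all (fun kv => window_count.getD kv.1 0 ≥ kv.2)
      then answer + 1 else answer)
    0

-- ===== PORT B =====
-- prefix-count list of `item` in `discount`: p = [0]; c = 0; for d in discount: c += (d == item); p.append(c)
def prefList (discount : List String) (item : String) : List Int :=
  (discount.foldl
    (fun s d => let c := if d == item then s.2 + 1 else s.2; (s.1 ++ [c], c))
    (([0] : List Int), (0 : Int))).1

def solution_alt (want : List String) (number : List Int) (discount : List String) : Int :=
  let demands : PySem.Dict String Int :=
    (want.zip number).foldl (fun d p => d.insert p.1 p.2) PySem.Dict.empty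
  let prefs : PySem.Dict String (List Int) :=
    demands.keys.foldl (fun pr item => pr.insert item (prefList discount item)) PySem.Dict.empty
  (PySem.List.pyRange 0 ((discount.length : Int) - 9) 1).foldl
    (fun answer i =>
      if demands.items.all (fun kv =>
          PySem.List.pyGetD (prefs.getD kv.1 []) (i + 10) 0
            - PySem.List.pyGetD (prefs.getD kv.1 []) i 0 ≥ kv.2)
      then answer + 1 else answer)
    0

-- ===== PRECONDITION & SPEC =====
-- Pre_ excludes exactly the inputs on which A raises IndexError (number[i] missing in the dict
-- comprehension when number is shorter than want); B returns a value there (its zip truncates).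
def Pre_solution (want : List String) (number : List Int) (discount : List String) : Prop :=
  want.length ≤ number.length
instance (want : List String) (number : List Int) (discount : List String) : Decidable (Pre_solution want number discount) := by unfold Pre_solution; infer_instance
def pvWitness_solution : List String × List Int × List String :=
  (["a", "b"], [1, 2], ["a", "b", "a", "a", "b", "a", "b", "b", "a", "b", "c"])

def Spec_solution (want : List String) (number : List Int) (discount : List String) (out : Int) : Prop := out = solution_alt want number discount
instance (want : List String) (number : List Int) (discount : List String) (out : Int) : Decidable (Spec_solution want number discount out) := by unfold Spec_solution; infer_instance

-- ===== CLAIM (what is proved, stated in full; the proofs are below) =====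
def Claim_equal_solution : Prop := ∀ (want : List String) (number : List Int) (discount : List String), Dom_solution want number discount → Pre_solution want number discount → Spec_solution want number discount (solution want number discount)

-- ===== LEMMAS AND PROOFS =====

lemma pref_fold (item : String) :
    ∀ (l : List String) (acc : List Int) (c : Int),
      l.foldl (fun s d => let c := if d == item then s.2 + 1 else s.2; (s.1 ++ [c], c)) (acc, c)
      = (acc ++ (List.range l.length).map (fun j => c + ((l.take (j+1)).count item : Int)),
         c + (l.count item : Int)) := by
  intro l
  induction l with
  | nil => intro acc c; simp
  | cons d t ih =>
    intro acc c
    simp only [List.foldl_cons]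
    rw [ih]
    have he : (if d == item then c + 1 else c) = c + (if d == item then (1:Int) else 0) := by
      split <;> simp
    rw [Prod.mk.injEq]
    constructor
    · rw [List.length_cons, List.range_succ_eq_map]
      simp only [List.map_cons, List.map_map, List.take_succ_cons, List.count_cons]
      rw [List.append_assoc]
      congr 1
      simp only [List.take_zero, List.count_nil, List.singleton_append]
      congr 1
      · rw [he]; push_cast; ring_nf
      · apply List.map_congr_left
        intro j _
        simp only [Function.comp_apply, Nat.succ_eq_add_one, he]
        push_cast
        ring
    · rw [List.count_cons, he]; push_cast; ring

lemma prefList_eq (l : List String) (item : String) :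
    prefList l item = (List.range (l.length+1)).map (fun j => ((l.take j).count item : Int)) := by
  unfold prefList
  rw [pref_fold]
  rw [List.range_succ_eq_map]
  simp [List.map_map, Function.comp_def]

lemma prefList_getD (l : List String) (item : String) (j : Nat) (hj : j ≤ l.length) :
    PySem.List.pyGetD (prefList l item) (j : Int) 0 = ((l.take j).count item : Int) := by
  rw [PySem.List.pyGetD_natCast, prefList_eq]
  rw [List.getD_eq_getElem?_getD, List.getElem?_map, List.getElem?_range (by omega)]
  rfl

lemma getD_foldl_insert_not_mem {κ ν : Type} [BEq κ] [LawfulBEq κ] (f : κ → ν) (dflt : ν) :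
    ∀ (l : List κ) (d : PySem.Dict κ ν) (x : κ), x ∉ l →
      (l.foldl (fun pr it => pr.insert it (f it)) d).getD x dflt = d.getD x dflt := by
  intro l
  induction l with
  | nil => intro d x _; rfl
  | cons y t ih =>
    intro d x hx
    simp only [List.mem_cons, not_or] at hx
    simp only [List.foldl_cons]
    rw [ih _ _ hx.2, PySem.Dict.getD_insert_of_ne _ _ _ hx.1]

lemma getD_foldl_insert_fun {κ ν : Type} [BEq κ] [LawfulBEq κ] (f : κ → ν) (dflt : ν) :
    ∀ (l : List κ) (d : PySem.Dict κ ν) (x : κ), x ∈ l →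
      (l.foldl (fun pr it => pr.insert it (f it)) d).getD x dflt = f x := by
  intro l
  induction l with
  | nil => intro d x hx; cases hx
  | cons y t ih =>
    intro d x hx
    simp only [List.foldl_cons]
    by_cases hxt : x ∈ t
    · exact ih _ _ hxt
    · have hxy : x = y := by rcases List.mem_cons.1 hx with h | h; exact h; exact absurd h hxt
      subst hxy
      rw [getD_foldl_insert_not_mem f dflt t _ x hxt, PySem.Dict.getD_insert_self]

lemma zip_fold (want : List String) (number : List Int) (h : want.length ≤ number.length) :
    ∀ (k : Nat), k ≤ want.length → ∀ (d0 : PySem.Dict String Int),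
      (List.range k).foldl
        (fun d j => d.insert (PySem.List.pyGetD want (j : Int) "") (PySem.List.pyGetD number (j : Int) 0)) d0
      = ((want.zip number).take k).foldl (fun d p => d.insert p.1 p.2) d0 := by
  intro k
  induction k with
  | zero => intro _ d0; rfl
  | succ k ih =>
    intro hk d0
    rw [List.range_succ, List.foldl_append, ih (by omega), List.take_add_one]
    have hz : (want.zip number)[k]? = some (want[k]'(by omega), number[k]'(by omega)) := by
      rw [List.getElem?_eq_getElem (by simp [List.length_zip]; omega)]
      simp
    rw [hz, List.foldl_append]
    simp only [PySem.List.pyGetD_natCast, Option.toList_some, List.foldl_cons, List.foldl_nil]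
    rw [List.getD_eq_getElem _ _ (by omega), List.getD_eq_getElem _ _ (by omega)]

lemma dict_eq (want : List String) (number : List Int) (h : want.length ≤ number.length) :
    (PySem.List.pyRange 0 (want.length : Int) 1).foldl
      (fun d i => d.insert (PySem.List.pyGetD want i "") (PySem.List.pyGetD number i 0))
      PySem.Dict.empty
    = (want.zip number).foldl (fun d p => d.insert p.1 p.2) PySem.Dict.empty := by
  rw [PySem.List.pyRange_zero_natCast, List.foldl_map, zip_fold want number h want.length le_rfl]
  rw [List.take_of_length_le (by simp [List.length_zip])]

lemma all_congr_mem {α : Type} (l : List α) (f g : α → Bool) (h : ∀ x ∈ l, f x = g x) :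
    l.all f = l.all g := by
  induction l with
  | nil => rfl
  | cons x t ih => simp_all [List.all_cons]

-- ===== VERDICT (by name: the statement is the Claim_ definition above) =====
theorem solution_spec : Claim_equal_solution := by
  intro want number discount _hdom hpre
  unfold Pre_solution at hpre
  unfold Spec_solution solution solution_alt
  simp only []
  rw [dict_eq want number hpre]
  apply PySem.List.foldl_congr_mem
  intro acc i hi
  rw [PySem.List.mem_pyRange_one] at hi
  obtain ⟨h0, hlt⟩ := hi
  obtain ⟨j, rfl⟩ : ∃ j : Nat, i = (j : Int) := ⟨i.toNat, (Int.toNat_of_nonneg h0).symm⟩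
  have hj10 : j + 10 ≤ discount.length := by omega
  have hcond :
      ((want.zip number).foldl (fun d p => d.insert p.1 p.2) PySem.Dict.empty).items.all
        (fun kv => decide (PySem.Dict.getD (PySem.Dict.counter (PySem.List.slice discount (some (j:Int)) (some ((j:Int) + 10)))) kv.1 0 ≥ kv.2))
      =
      ((want.zip number).foldl (fun d p => d.insert p.1 p.2) PySem.Dict.empty).items.all
        (fun kv => decide (PySem.List.pyGetD ((((want.zip number).foldl (fun d p => d.insert p.1 p.2) PySem.Dict.empty).keys.foldl (fun pr item => pr.insert item (prefList discount item)) PySem.Dict.empty).getD kv.1 []) ((j:Int) + 10) 0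
              - PySem.List.pyGetD ((((want.zip number).foldl (fun d p => d.insert p.1 p.2) PySem.Dict.empty).keys.foldl (fun pr item => pr.insert item (prefList discount item)) PySem.Dict.empty).getD kv.1 []) (j:Int) 0 ≥ kv.2)) := by
    apply all_congr_mem
    intro kv hkv
    have hk : kv.1 ∈ ((want.zip number).foldl (fun d p => d.insert p.1 p.2) PySem.Dict.empty).keys := by
      simp only [PySem.Dict.keys]
      exact List.mem_map_of_mem hkv
    rw [getD_foldl_insert_fun (prefList discount) [] _ _ _ hk]
    have hsl : PySem.List.slice discount (some (j:Int)) (some ((j:Int) + 10))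
        = (discount.drop j).take 10 := by
      have := PySem.List.slice_natCast_add discount j 10
      simpa using this
    rw [hsl, PySem.Dict.getD_counter]
    have h10 : ((j:Int) + 10) = ((j + 10 : Nat) : Int) := by push_cast; ring
    rw [h10, prefList_getD discount kv.1 (j+10) hj10, prefList_getD discount kv.1 j (by omega)]
    have hcnt : ((discount.take (j+10)).count kv.1 : Int) - ((discount.take j).count kv.1 : Int)
        = (((discount.drop j).take 10).count kv.1 : Int) := by
      rw [List.take_add, List.count_append]
      push_cast
      ring
    rw [hcnt]
  rw [hcond]
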